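-- pv_equiv track=rewrite | github.com/MrBrantCode/unitest_baseline | mut_generate/mist_train_taco/taco_13925/solution.py | calculate_minimum_cost
-- ===== SOURCE A (Python) =====
-- def calculate_minimum_cost(matrix, path_string, cost_matrix_change, cost_string_change):
--     n = len(matrix)
--     m = len(matrix[0])
--     ans = [[0, 0] for _ in range(n + m)]
--
--     # Count the number of 0s and 1s in each diagonal
--     for i in range(n):
--         for j in range(m):
--             if matrix[i][j] == 0:
--                 ans[i + j][0] += 1
--             else:
--                 ans[i + j][1] += 1
--
--     total_cost = 0
--
--     # Calculate the minimum cost for each diagonal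
--     for i in range(n + m - 1):
--         if path_string[i] == '0':
--             cost_if_change_matrix = ans[i][1] * cost_matrix_change
--             cost_if_change_string = cost_string_change + ans[i][0] * cost_matrix_change
--             total_cost += min(cost_if_change_matrix, cost_if_change_string)
--         else:
--             cost_if_change_matrix = ans[i][0] * cost_matrix_change
--             cost_if_change_string = cost_string_change + ans[i][1] * cost_matrix_change
--             total_cost += min(cost_if_change_matrix, cost_if_change_string)
--
--     return total_cost
-- ===== SOURCE B (Python) =====
-- def calculate_minimum_cost(matrix, path_string, cost_matrix_change, cost_string_change):
--     n = len(matrix)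
--     m = len(matrix[0])
--     total_cost = 0
--     # One pass per anti-diagonal: count its zeros and ones on the fly, no table.
--     for d in range(n + m - 1):
--         zeros = 0
--         ones = 0
--         for i in range(n):
--             j = d - i
--             if 0 <= j < m:
--                 if matrix[i][j] == 0:
--                     zeros += 1
--                 else:
--                     ones += 1
--         if path_string[d] == '0':
--             total_cost += min(ones * cost_matrix_change,
--                               cost_string_change + zeros * cost_matrix_change)
--         else:
--             total_cost += min(zeros * cost_matrix_change,
--                               cost_string_change + ones * cost_matrix_change)
--     return total_cost
-- ===== Notes on version B (the rewrite author's own statement) =====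
-- stated objective: alternative
-- what changed: Eliminates the n+m count table: B fuses counting and costing into one loop over anti-diagonals, recomputing each diagonal's zero/one counts in place of A's precomputed table.
import Mathlib
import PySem

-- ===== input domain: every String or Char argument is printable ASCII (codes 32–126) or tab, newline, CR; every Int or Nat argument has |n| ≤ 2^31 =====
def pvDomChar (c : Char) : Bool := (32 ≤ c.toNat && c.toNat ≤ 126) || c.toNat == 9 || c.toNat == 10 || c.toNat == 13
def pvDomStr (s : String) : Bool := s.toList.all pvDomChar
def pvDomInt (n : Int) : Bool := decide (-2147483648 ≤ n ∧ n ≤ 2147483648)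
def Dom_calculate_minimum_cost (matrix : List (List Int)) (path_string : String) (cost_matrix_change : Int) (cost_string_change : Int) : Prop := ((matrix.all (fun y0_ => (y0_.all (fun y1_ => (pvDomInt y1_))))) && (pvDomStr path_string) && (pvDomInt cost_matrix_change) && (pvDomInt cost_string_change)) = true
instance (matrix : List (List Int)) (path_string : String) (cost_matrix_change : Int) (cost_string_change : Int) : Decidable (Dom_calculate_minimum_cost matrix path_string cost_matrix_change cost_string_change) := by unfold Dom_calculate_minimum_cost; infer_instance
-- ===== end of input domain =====

-- B removes A's n+m count table and fuses counting with costing per anti-diagonal (alternative decomposition, not faster).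


-- ===== PORT A =====
def calculate_minimum_cost (matrix : List (List Int)) (path_string : String) (cost_matrix_change : Int) (cost_string_change : Int) : Int :=
  let n : Int := matrix.length
  let m : Int := (PySem.List.pyGetD matrix 0 []).length
  let ans : List (Int × Int) := (PySem.List.pyRange 0 (n + m) 1).map (fun _ => ((0 : Int), (0 : Int)))
  let ans := (PySem.List.pyRange 0 n 1).foldl (fun ans i =>
    (PySem.List.pyRange 0 m 1).foldl (fun ans j =>
      if PySem.List.pyGetD (PySem.List.pyGetD matrix i []) j 0 = 0 then
        PySem.List.pySetD ans (i + j)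
          ((PySem.List.pyGetD ans (i + j) ((0 : Int), (0 : Int))).1 + 1,
           (PySem.List.pyGetD ans (i + j) ((0 : Int), (0 : Int))).2)
      else
        PySem.List.pySetD ans (i + j)
          ((PySem.List.pyGetD ans (i + j) ((0 : Int), (0 : Int))).1,
           (PySem.List.pyGetD ans (i + j) ((0 : Int), (0 : Int))).2 + 1)) ans) ans
  (PySem.List.pyRange 0 (n + m - 1) 1).foldl (fun total_cost i =>
    let p := PySem.List.pyGetD ans i ((0 : Int), (0 : Int))
    if PySem.Str.pyGet? path_string i = some '0' then
      total_cost + min (p.2 * cost_matrix_change) (cost_string_change + p.1 * cost_matrix_change)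
    else
      total_cost + min (p.1 * cost_matrix_change) (cost_string_change + p.2 * cost_matrix_change)) 0

-- ===== PORT B =====
def calculate_minimum_cost_alt (matrix : List (List Int)) (path_string : String) (cost_matrix_change : Int) (cost_string_change : Int) : Int :=
  let n : Int := matrix.length
  let m : Int := (PySem.List.pyGetD matrix 0 []).length
  (PySem.List.pyRange 0 (n + m - 1) 1).foldl (fun total_cost d =>
    let zo := (PySem.List.pyRange 0 n 1).foldl (fun zo i =>
      let j := d - i
      if 0 ≤ j ∧ j < m then
        (if PySem.List.pyGetD (PySem.List.pyGetD matrix i []) j 0 = 0 then (zo.1 + 1, zo.2)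
         else (zo.1, zo.2 + 1))
      else zo) ((0 : Int), (0 : Int))
    if PySem.Str.pyGet? path_string d = some '0' then
      total_cost + min (zo.2 * cost_matrix_change) (cost_string_change + zo.1 * cost_matrix_change)
    else
      total_cost + min (zo.1 * cost_matrix_change) (cost_string_change + zo.2 * cost_matrix_change)) 0

-- ===== PRECONDITION & SPEC =====
-- Pre_ excludes exactly the inputs where Python A raises IndexError: an empty matrix
-- (matrix[0]), a row shorter than the first row (matrix[i][j]), or a path string shorter
-- than n+m-1 (path_string[i]).  A returns on every input admitted here.
def Pre_calculate_minimum_cost (matrix : List (List Int)) (path_string : String) (cost_matrix_change : Int) (cost_string_change : Int) : Prop :=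
  matrix ≠ [] ∧
  (∀ row ∈ matrix, (matrix.headI).length ≤ row.length) ∧
  (matrix.length : Int) + ((matrix.headI).length : Int) - 1 ≤ (path_string.toList.length : Int)
instance (matrix : List (List Int)) (path_string : String) (cost_matrix_change : Int) (cost_string_change : Int) : Decidable (Pre_calculate_minimum_cost matrix path_string cost_matrix_change cost_string_change) := by unfold Pre_calculate_minimum_cost; infer_instance
def pvWitness_calculate_minimum_cost : List (List Int) × String × Int × Int := ([[0, 1], [1, 0]], "010", 2, 3)

def Spec_calculate_minimum_cost (matrix : List (List Int)) (path_string : String) (cost_matrix_change : Int) (cost_string_change : Int) (out : Int) : Prop := out = calculate_minimum_cost_alt matrix path_string cost_matrix_change cost_string_change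
instance (matrix : List (List Int)) (path_string : String) (cost_matrix_change : Int) (cost_string_change : Int) (out : Int) : Decidable (Spec_calculate_minimum_cost matrix path_string cost_matrix_change cost_string_change out) := by unfold Spec_calculate_minimum_cost; infer_instance

-- ===== CLAIM (what is proved, stated in full; the proofs are below) =====
def Claim_equal_calculate_minimum_cost : Prop := ∀ (matrix : List (List Int)) (path_string : String) (cost_matrix_change : Int) (cost_string_change : Int), Dom_calculate_minimum_cost matrix path_string cost_matrix_change cost_string_change → Pre_calculate_minimum_cost matrix path_string cost_matrix_change cost_string_change → Spec_calculate_minimum_cost matrix path_string cost_matrix_change cost_string_change (calculate_minimum_cost matrix path_string cost_matrix_change cost_string_change)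

-- ===== LEMMAS AND PROOFS =====

-- the per-cell counter update both programs perform
def pvStep (matrix : List (List Int)) (i j : Int) (p : Int × Int) : Int × Int :=
  if PySem.List.pyGetD (PySem.List.pyGetD matrix i []) j 0 = 0 then (p.1 + 1, p.2) else (p.1, p.2 + 1)

theorem pv_getD_nonneg (xs : List (Int × Int)) (i : Int) (h : 0 ≤ i) (d : Int × Int) :
    PySem.List.pyGetD xs i d = xs.getD i.toNat d := by
  simp only [PySem.List.pyGetD, PySem.List.pyGet?, PySem.List.pyIdx?]
  by_cases hlt : i < (xs.length : Int)
  · simp [h, hlt, List.getD]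
  · simp only [h, hlt, if_true, if_false, List.getD]
    simp
    rw [List.getElem?_eq_none (by omega)]
    rfl

theorem pv_inner_length (matrix : List (List Int)) (i : Int) (js : List Int) (T : List (Int × Int)) :
    (js.foldl (fun ans j => PySem.List.pySetD ans (i + j) (pvStep matrix i j (PySem.List.pyGetD ans (i + j) ((0 : Int), (0 : Int))))) T).length = T.length := by
  induction js generalizing T with
  | nil => rfl
  | cons j js ih => simp only [List.foldl_cons]; rw [ih, PySem.List.length_pySetD]

theorem pv_inner_entry (matrix : List (List Int)) (i d : Int) (hi : 0 ≤ i) (hd : 0 ≤ d) :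
    ∀ (k : Nat) (a b : Int) (T : List (Int × Int)), (b - a).toNat = k → 0 ≤ a → d.toNat < T.length →
    PySem.List.pyGetD ((PySem.List.pyRange a b 1).foldl (fun ans j => PySem.List.pySetD ans (i + j) (pvStep matrix i j (PySem.List.pyGetD ans (i + j) ((0 : Int), (0 : Int))))) T) d ((0 : Int), (0 : Int))
      = if a ≤ d - i ∧ d - i < b then pvStep matrix i (d - i) (PySem.List.pyGetD T d ((0 : Int), (0 : Int))) else PySem.List.pyGetD T d ((0 : Int), (0 : Int)) := by
  intro k
  induction k with
  | zero =>
    intro a b T hk ha hT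
    rw [PySem.List.pyRange_one_eq_nil (by omega), if_neg (by omega)]
    rfl
  | succ k ih =>
    intro a b T hk ha hT
    have hab : a < b := by omega
    rw [PySem.List.pyRange_one_cons hab, List.foldl_cons,
      ih (a + 1) b _ (by omega) (by omega) (by rw [PySem.List.length_pySetD]; exact hT)]
    rw [PySem.List.pySetD_of_nonneg T _ (by omega)]
    rw [pv_getD_nonneg _ d hd, pv_getD_nonneg T d hd]
    by_cases hda : d = i + a
    · have h1 : ¬ (a + 1 ≤ d - i ∧ d - i < b) := by omega
      have h2 : a ≤ d - i ∧ d - i < b := by omega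
      rw [if_neg h1, if_pos h2]
      simp only [List.getD, List.getElem?_set]
      have : (i + a).toNat = d.toNat := by omega
      rw [this, if_pos rfl, if_pos (by omega : d.toNat < T.length)]
      have hdi : d - i = a := by omega
      rw [hdi, hda]
      rw [pv_getD_nonneg T (i + a) (by omega)]
      rfl
    · have hne : (i + a).toNat ≠ d.toNat := by omega
      simp only [List.getD, List.getElem?_set, hne, ite_false]
      have hiff : (a + 1 ≤ d - i ∧ d - i < b) ↔ (a ≤ d - i ∧ d - i < b) := by omega
      rw [if_congr hiff rfl rfl]

theorem pv_outer_entry (matrix : List (List Int)) (m d : Int) (hd : 0 ≤ d) :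
    ∀ (k : Nat) (a b : Int) (T : List (Int × Int)), (b - a).toNat = k → 0 ≤ a → d.toNat < T.length →
    PySem.List.pyGetD ((PySem.List.pyRange a b 1).foldl (fun ans i =>
        (PySem.List.pyRange 0 m 1).foldl (fun ans j => PySem.List.pySetD ans (i + j) (pvStep matrix i j (PySem.List.pyGetD ans (i + j) ((0 : Int), (0 : Int))))) ans) T) d ((0 : Int), (0 : Int))
      = (PySem.List.pyRange a b 1).foldl (fun zo i => if 0 ≤ d - i ∧ d - i < m then pvStep matrix i (d - i) zo else zo) (PySem.List.pyGetD T d ((0 : Int), (0 : Int))) := by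
  intro k
  induction k with
  | zero =>
    intro a b T hk ha hT
    rw [show PySem.List.pyRange a b 1 = [] from PySem.List.pyRange_one_eq_nil (by omega)]
    rfl
  | succ k ih =>
    intro a b T hk ha hT
    have hab : a < b := by omega
    rw [PySem.List.pyRange_one_cons hab, List.foldl_cons, List.foldl_cons,
      ih (a + 1) b _ (by omega) (by omega) (by rw [pv_inner_length]; exact hT)]
    rw [pv_inner_entry matrix a d ha hd (m - 0).toNat 0 m T rfl le_rfl hT]

-- ===== VERDICT (by name: the statement is the Claim_ definition above) =====
theorem calculate_minimum_cost_spec : Claim_equal_calculate_minimum_cost := by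
  intro matrix path_string cost_matrix_change cost_string_change _ _
  unfold Spec_calculate_minimum_cost
  simp only [calculate_minimum_cost, calculate_minimum_cost_alt]
  apply PySem.List.foldl_congr_mem
  intro acc x hx
  obtain ⟨hx0, hx1⟩ := (PySem.List.mem_pyRange_one).mp hx
  -- bring A's table build into pvStep shape
  have htab :
      (PySem.List.pyRange 0 (matrix.length : Int) 1).foldl (fun ans i =>
        (PySem.List.pyRange 0 ((PySem.List.pyGetD matrix 0 []).length : Int) 1).foldl (fun ans j =>
          if PySem.List.pyGetD (PySem.List.pyGetD matrix i []) j 0 = 0 then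
            PySem.List.pySetD ans (i + j)
              ((PySem.List.pyGetD ans (i + j) ((0 : Int), (0 : Int))).1 + 1,
               (PySem.List.pyGetD ans (i + j) ((0 : Int), (0 : Int))).2)
          else
            PySem.List.pySetD ans (i + j)
              ((PySem.List.pyGetD ans (i + j) ((0 : Int), (0 : Int))).1,
               (PySem.List.pyGetD ans (i + j) ((0 : Int), (0 : Int))).2 + 1)) ans)
        ((PySem.List.pyRange 0 ((matrix.length : Int) + ((PySem.List.pyGetD matrix 0 []).length : Int)) 1).map (fun _ => ((0 : Int), (0 : Int))))
      = (PySem.List.pyRange 0 (matrix.length : Int) 1).foldl (fun ans i =>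
        (PySem.List.pyRange 0 ((PySem.List.pyGetD matrix 0 []).length : Int) 1).foldl (fun ans j =>
          PySem.List.pySetD ans (i + j) (pvStep matrix i j (PySem.List.pyGetD ans (i + j) ((0 : Int), (0 : Int))))) ans)
        ((PySem.List.pyRange 0 ((matrix.length : Int) + ((PySem.List.pyGetD matrix 0 []).length : Int)) 1).map (fun _ => ((0 : Int), (0 : Int)))) := by
    apply PySem.List.foldl_congr_mem
    intro ansAcc i _
    apply PySem.List.foldl_congr_mem
    intro ans2 j _
    rw [pvStep, apply_ite (PySem.List.pySetD ans2 (i + j))]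
  rw [htab]
  rw [pv_outer_entry matrix ((PySem.List.pyGetD matrix 0 []).length : Int) x hx0
    ((matrix.length : Int) - 0).toNat 0 (matrix.length : Int) _ rfl le_rfl
    (by rw [List.length_map, PySem.List.length_pyRange_one]; omega)]
  rw [PySem.List.pyGetD_map_pyRange_of_nonneg _ _ _ _ hx0 (by omega)]
  simp only [pvStep]
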